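-- pv_equiv track=rewrite | github.com/Sid-131/Second-project | tests/test_phase3.py | _count_themes_in_md
-- ===== SOURCE A (Python) =====
-- def _count_themes_in_md(markdown: str) -> int:
--     """Count numbered items under the ## Top 3 Themes heading."""
--     in_section = False
--     count = 0
--     for line in markdown.splitlines():
--         stripped = line.strip()
--         if stripped.startswith("## Top 3 Themes"):
--             in_section = True
--             continue
--         if in_section:
--             if stripped.startswith("## "):
--                 break  # next heading
--             # Match numbered list items: "1. ", "2. ", etc.
--             if stripped and stripped[0].isdigit() and ". " in stripped:
--                 count += 1
--     return count
-- ===== SOURCE B (Python) =====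
-- def _count_themes_in_md(markdown: str) -> int:
--     """Count numbered items under the ## Top 3 Themes heading."""
--     lines = [line.strip() for line in markdown.splitlines()]
--     start = next((i for i, s in enumerate(lines)
--                   if s.startswith("## Top 3 Themes")), None)
--     if start is None:
--         return 0
--     rest = lines[start + 1:]
--     stop = next((i for i, s in enumerate(rest)
--                  if s.startswith("## ") and not s.startswith("## Top 3 Themes")), len(rest))
--     return sum(1 for s in rest[:stop] if s and s[0].isdigit() and ". " in s)
-- ===== Notes on version B (the rewrite author's own statement) =====
-- stated objective: alternative
-- what changed: Replaces A's flag-driven single scan (in_section boolean, break on next heading) with locate-boundaries-then-count: find the index of the first '## Top 3 Themes' line, find the index of the next other '## ' heading, and count matching lines in that slice.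
import Mathlib
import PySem

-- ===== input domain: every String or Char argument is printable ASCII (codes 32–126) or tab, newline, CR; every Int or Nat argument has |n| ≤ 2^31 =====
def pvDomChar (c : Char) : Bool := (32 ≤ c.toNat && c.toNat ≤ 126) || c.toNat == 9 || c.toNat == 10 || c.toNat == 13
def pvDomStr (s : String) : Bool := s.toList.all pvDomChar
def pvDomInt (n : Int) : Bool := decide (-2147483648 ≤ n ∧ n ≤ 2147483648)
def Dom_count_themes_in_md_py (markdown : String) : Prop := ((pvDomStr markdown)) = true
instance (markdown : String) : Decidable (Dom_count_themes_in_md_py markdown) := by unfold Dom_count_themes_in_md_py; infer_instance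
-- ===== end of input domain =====

-- B replaces A's flag-driven scan (in_section boolean + break) with locate-the-section-boundaries-then-count; same cost, different decomposition.

-- Shared predicate helpers: these three tests appear verbatim in both Python sources.
-- stripped.startswith("## Top 3 Themes")
def pvIsTop3 (s : String) : Bool := PySem.Str.startswith s "## Top 3 Themes"
-- stripped[0].isdigit(), guarded by the 'stripped and' short-circuit (empty → False)
def pvHeadIsDigit (s : String) : Bool :=
  match PySem.Str.pyGet? s 0 with
  | some c => PySem.Str.isdigit c
  | none => false
-- stripped and stripped[0].isdigit() and ". " in stripped
def pvIsItem (s : String) : Bool := (s ≠ "" : Bool) && pvHeadIsDigit s && PySem.Str.isIn ". " s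

-- ===== PORT A =====
-- the 'for line in …' loop carrying the in_section flag and count; 'break' returns count
def pvCountLoop : List String → Bool → Int → Int
  | [], _, count => count
  | line :: rest, inSection, count =>
    let stripped := PySem.Str.strip line
    if pvIsTop3 stripped then
      pvCountLoop rest true count
    else if inSection then
      if PySem.Str.startswith stripped "## " then count
      else if pvIsItem stripped then pvCountLoop rest inSection (count + 1)
      else pvCountLoop rest inSection count
    else pvCountLoop rest inSection count

def count_themes_in_md_py (markdown : String) : Int :=
  pvCountLoop (PySem.Str.splitlines markdown) false 0

-- ===== PORT B =====
-- s.startswith("## ") and not s.startswith("## Top 3 Themes")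
def pvIsStop (s : String) : Bool := PySem.Str.startswith s "## " && !pvIsTop3 s

def count_themes_in_md_py_alt (markdown : String) : Int :=
  let lines := (PySem.Str.splitlines markdown).map PySem.Str.strip
  match lines.findIdx? pvIsTop3 with
  | none => 0
  | some start =>
    let rest := lines.drop (start + 1)
    let stop := (rest.findIdx? pvIsStop).getD rest.length
    ((rest.take stop).countP pvIsItem : Int)

-- ===== PRECONDITION & SPEC =====
def Spec_count_themes_in_md_py (markdown : String) (out : Int) : Prop := out = count_themes_in_md_py_alt markdown
instance (markdown : String) (out : Int) : Decidable (Spec_count_themes_in_md_py markdown out) := by unfold Spec_count_themes_in_md_py; infer_instance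

-- ===== CLAIM (what is proved, stated in full; the proofs are below) =====
def Claim_equal_count_themes_in_md_py : Prop := ∀ (markdown : String), Dom_count_themes_in_md_py markdown → Spec_count_themes_in_md_py markdown (count_themes_in_md_py markdown)

-- ===== LEMMAS AND PROOFS =====

-- the count B produces once inside the section, over already-stripped lines
def pvInCount (st : List String) : Int :=
  ((st.take ((st.findIdx? pvIsStop).getD st.length)).countP pvIsItem : Int)

-- a '## Top 3 Themes' line never counts as a numbered item (its first char is '#')
theorem pvIsItem_of_top3 (s : String) (h : pvIsTop3 s = true) : pvIsItem s = false := by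
  have hpre : "## Top 3 Themes".toList <+: s.toList := by
    rw [pvIsTop3, PySem.Str.startswith_eq] at h
    exact (PySem.Chars.startswith_iff _ _).mp h
  obtain ⟨t, ht⟩ := hpre
  have hhead : s.toList = '#' :: ("# Top 3 Themes".toList ++ t) := by rw [← ht]; rfl
  have hget : PySem.List.pyGet? s.toList 0 = some '#' := by
    rw [hhead]; simp [PySem.List.pyGet?, PySem.List.pyIdx?]
    rw [if_pos (by positivity)]; rfl
  simp [pvIsItem, pvHeadIsDigit, PySem.Str.pyGet?_eq, hget,
    show PySem.Str.isdigit '#' = false from rfl]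

theorem pvInCount_cons_stop (s : String) (st : List String) (h : pvIsStop s = true) :
    pvInCount (s :: st) = 0 := by
  simp [pvInCount, List.findIdx?_cons, h]

theorem pvInCount_cons_notStop (s : String) (st : List String) (h : pvIsStop s = false) :
    pvInCount (s :: st) = (if pvIsItem s then 1 else 0) + pvInCount st := by
  unfold pvInCount
  rw [List.findIdx?_cons, if_neg (by simp [h])]
  cases hf : st.findIdx? pvIsStop with
  | none =>
    simp only [Option.map_none, Option.getD_none, List.length_cons, List.take_succ_cons,
      List.countP_cons]
    push_cast; split <;> ring
  | some i =>
    simp only [Option.map_some, Option.getD_some, List.take_succ_cons, List.countP_cons]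
    push_cast; split <;> ring

-- in-section phase of A's loop = count over the slice up to the stop line
theorem pvLoop_true (ls : List String) : ∀ c : Int,
    pvCountLoop ls true c = c + pvInCount (ls.map PySem.Str.strip) := by
  induction ls with
  | nil => intro c; simp [pvCountLoop, pvInCount]
  | cons l t ih =>
    intro c
    simp only [List.map_cons]
    cases h3 : pvIsTop3 (PySem.Str.strip l) with
    | true =>
      rw [show pvCountLoop (l :: t) true c = pvCountLoop t true c from by
        simp only [pvCountLoop, h3, if_true]]
      rw [pvInCount_cons_notStop _ _ (by
          simp only [pvIsStop, h3, Bool.not_true, Bool.and_false]),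
        pvIsItem_of_top3 _ h3, ih]
      simp
    | false =>
      cases hstop : PySem.Str.startswith (PySem.Str.strip l) "## " with
      | true =>
        rw [show pvCountLoop (l :: t) true c = c from by
          simp only [pvCountLoop, h3, hstop, Bool.false_eq_true, if_false, if_true]]
        rw [pvInCount_cons_stop _ _ (by simp only [pvIsStop, h3, hstop]; rfl)]
        ring
      | false =>
        have hns : pvIsStop (PySem.Str.strip l) = false := by simp only [pvIsStop, hstop]; rfl
        rw [pvInCount_cons_notStop _ _ hns]
        cases hit : pvIsItem (PySem.Str.strip l) with
        | true =>
          rw [show pvCountLoop (l :: t) true c = pvCountLoop t true (c + 1) from by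
            simp only [pvCountLoop, h3, hstop, hit, Bool.false_eq_true, if_false, if_true]]
          rw [ih]; simp; ring
        | false =>
          rw [show pvCountLoop (l :: t) true c = pvCountLoop t true c from by
            simp only [pvCountLoop, h3, hstop, hit, Bool.false_eq_true, if_false, if_true]]
          rw [ih]; simp

-- searching phase: A's whole loop = find the heading, then the in-section count
theorem pvLoop_false (ls : List String) : ∀ c : Int,
    pvCountLoop ls false c =
      c + (match (ls.map PySem.Str.strip).findIdx? pvIsTop3 with
           | none => 0
           | some i => pvInCount ((ls.map PySem.Str.strip).drop (i + 1))) := by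
  induction ls with
  | nil => intro c; simp [pvCountLoop]
  | cons l t ih =>
    intro c
    simp only [List.map_cons]
    cases h3 : pvIsTop3 (PySem.Str.strip l) with
    | true =>
      rw [show pvCountLoop (l :: t) false c = pvCountLoop t true c from by
        simp only [pvCountLoop, h3, if_true]]
      rw [List.findIdx?_cons, if_pos h3]
      simpa using pvLoop_true t c
    | false =>
      rw [show pvCountLoop (l :: t) false c = pvCountLoop t false c from by
        simp only [pvCountLoop, h3, Bool.false_eq_true, if_false]]
      rw [List.findIdx?_cons, if_neg (by simp [h3])]
      rw [ih]
      cases (t.map PySem.Str.strip).findIdx? pvIsTop3 <;> simp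

-- ===== VERDICT (by name: the statement is the Claim_ definition above) =====
theorem count_themes_in_md_py_spec : Claim_equal_count_themes_in_md_py := by
  intro md _
  unfold Spec_count_themes_in_md_py count_themes_in_md_py count_themes_in_md_py_alt
  rw [pvLoop_false]
  cases h : (List.map PySem.Str.strip (PySem.Str.splitlines md)).findIdx? pvIsTop3 <;>
    simp [h, pvInCount]
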